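-- pv_equiv track=rewrite | github.com/yeongjoonJu/NLP_followup | scripts/analysis.py | get_doc_freq_from_tfs
-- ===== SOURCE A (Python) =====
-- def get_doc_freq_from_tfs(tfs, vocab):
--     df = {}
--     for v in list(vocab):
--         df[v] = 0
--         for tf in tfs:
--             if tf.get(v) is not None:
--                 df[v] += 1
--     return df
-- ===== SOURCE B (Python) =====
-- def get_doc_freq_from_tfs(tfs, vocab):
--     df = {v: 0 for v in vocab}
--     vset = set(vocab)
--     for tf in tfs:
--         for key in tf:
--             if key in vset:
--                 df[key] += 1
--     return df
-- ===== Notes on version B (the rewrite author's own statement) =====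
-- stated objective: faster
-- what changed: Replaces A's per-vocab-term rescan of all documents with a zero-initialized table in vocab order plus one single pass over the documents that increments df[key] for each document key in the vocab set.
import Mathlib
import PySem

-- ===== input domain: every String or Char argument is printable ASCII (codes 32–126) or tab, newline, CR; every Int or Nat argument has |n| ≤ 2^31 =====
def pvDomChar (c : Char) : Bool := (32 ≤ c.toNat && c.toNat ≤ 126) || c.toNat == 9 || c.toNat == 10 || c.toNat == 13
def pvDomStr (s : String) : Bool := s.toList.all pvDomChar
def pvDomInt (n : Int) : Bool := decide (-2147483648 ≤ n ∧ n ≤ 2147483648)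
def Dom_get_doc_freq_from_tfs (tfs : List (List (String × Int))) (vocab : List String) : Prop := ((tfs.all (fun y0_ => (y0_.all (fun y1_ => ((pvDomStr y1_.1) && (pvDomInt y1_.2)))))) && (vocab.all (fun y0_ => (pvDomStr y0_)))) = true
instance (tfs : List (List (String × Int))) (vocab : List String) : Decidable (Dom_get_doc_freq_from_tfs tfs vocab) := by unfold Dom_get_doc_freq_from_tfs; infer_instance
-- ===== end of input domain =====

-- B replaces A's per-vocab-term rescan of all documents with a single pass over the documents
-- accumulating into a zero-initialized vocab-ordered table (objective: faster, constant-factor).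


-- ===== PORT A =====
-- for v in list(vocab): df[v] = 0; for tf in tfs: if tf.get(v) is not None: df[v] += 1
def get_doc_freq_from_tfs (tfs : List (List (String × Int))) (vocab : List String) : List (String × Int) :=
  (vocab.foldl (fun (df : PySem.Dict String Int) v =>
      tfs.foldl (fun df tf =>
          if ((PySem.Dict.mk tf).get? v).isSome then
            df.insert v (df.getD v 0 + 1)
          else df)
        (df.insert v 0))
    PySem.Dict.empty).items

-- ===== PORT B =====
-- df = {v: 0 for v in vocab}; vset = set(vocab); for tf in tfs: for key in tf: if key in vset: df[key] += 1
def get_doc_freq_from_tfs_alt (tfs : List (List (String × Int))) (vocab : List String) : List (String × Int) :=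
  let vset : PySem.Set String := PySem.Set.ofList vocab
  let df0 : PySem.Dict String Int := vocab.foldl (fun d v => d.insert v 0) PySem.Dict.empty
  (tfs.foldl (fun df tf =>
      ((PySem.Dict.mk tf).keys).foldl (fun (df : PySem.Dict String Int) k =>
          if PySem.Set.contains vset k then df.insert k (df.getD k 0 + 1) else df)
        df)
    df0).items

-- ===== PRECONDITION & SPEC =====
-- Pre_ states the Python-dict representation invariant: each tf is an association list with
-- pairwise-distinct keys (a Python dict can never have duplicate keys), so no real Python input
-- is excluded.
def Pre_get_doc_freq_from_tfs (tfs : List (List (String × Int))) (vocab : List String) : Prop :=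
  ∀ tf ∈ tfs, (tf.map Prod.fst).Nodup
instance (tfs : List (List (String × Int))) (vocab : List String) : Decidable (Pre_get_doc_freq_from_tfs tfs vocab) := by unfold Pre_get_doc_freq_from_tfs; infer_instance
def pvWitness_get_doc_freq_from_tfs : (List (List (String × Int))) × List String :=
  ([[("a", 1)], [("b", 2), ("a", 3)]], ["a", "c"])
def Spec_get_doc_freq_from_tfs (tfs : List (List (String × Int))) (vocab : List String) (out : List (String × Int)) : Prop := out = get_doc_freq_from_tfs_alt tfs vocab
instance (tfs : List (List (String × Int))) (vocab : List String) (out : List (String × Int)) : Decidable (Spec_get_doc_freq_from_tfs tfs vocab out) := by unfold Spec_get_doc_freq_from_tfs; infer_instance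

-- ===== CLAIM (what is proved, stated in full; the proofs are below) =====
def Claim_equal_get_doc_freq_from_tfs : Prop := ∀ (tfs : List (List (String × Int))) (vocab : List String), Dom_get_doc_freq_from_tfs tfs vocab → Pre_get_doc_freq_from_tfs tfs vocab → Spec_get_doc_freq_from_tfs tfs vocab (get_doc_freq_from_tfs tfs vocab)

-- ===== LEMMAS AND PROOFS =====

-- number of documents that contain v
def pvCnt (tfs : List (List (String × Int))) (v : String) : Int :=
  (tfs.countP (fun tf => ((PySem.Dict.mk tf).get? v).isSome) : Int)

-- dict with key list M and value h v at each key v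
def pvD (M : List String) (h : String → Int) : PySem.Dict String Int :=
  PySem.Dict.mk (M.map (fun v => (v, h v)))

theorem pvD_keys (M : List String) (h : String → Int) : (pvD M h).keys = M := by
  simp [pvD, PySem.Dict.keys, Function.comp_def]

theorem pvD_getD (M : List String) (h : String → Int) (k : String)
    (hM : M.Nodup) (hk : k ∈ M) : (pvD M h).getD k 0 = h k := by
  apply PySem.Dict.getD_of_mem_items
  · exact List.mem_map_of_mem hk
  · rw [pvD_keys]; exact hM

theorem pvD_insert (M : List String) (h : String → Int) (k : String) (x : Int)
    (hk : k ∈ M) : (pvD M h).insert k x = pvD M (fun v => if v = k then x else h v) := by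
  have hc : (pvD M h).contains k = true := by
    rw [PySem.Dict.contains_iff_mem_keys, pvD_keys]; exact hk
  apply PySem.Dict.ext
  rw [PySem.Dict.items_insert_of_contains _ _ hc]
  simp only [pvD, List.map_map]
  apply List.map_congr_left
  intro v _
  by_cases hv : v = k <;> simp [hv]

theorem pvD_congr (M : List String) (h h' : String → Int)
    (hh : ∀ v ∈ M, h v = h' v) : pvD M h = pvD M h' := by
  apply PySem.Dict.ext
  simp only [pvD]
  apply List.map_congr_left
  intro v hv
  rw [hh v hv]

-- A's inner loop over tfs starting with df[v] = c sets df[v] to c + count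
theorem pvInnerA (tfs : List (List (String × Int))) (v : String)
    (df : PySem.Dict String Int) (c : Int) :
    tfs.foldl (fun df tf =>
        if ((PySem.Dict.mk tf).get? v).isSome then
          df.insert v (df.getD v 0 + 1)
        else df) (df.insert v c)
      = df.insert v (c + pvCnt tfs v) := by
  induction tfs generalizing c with
  | nil => simp [pvCnt]
  | cons tf ts ih =>
    simp only [List.foldl_cons]
    by_cases hp : ((PySem.Dict.mk tf).get? v).isSome
    · rw [if_pos hp, PySem.Dict.getD_insert_self, PySem.Dict.insert_insert_self, ih]
      congr 1
      simp [pvCnt, hp]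
      ring
    · rw [if_neg hp, ih]
      congr 1
      simp [pvCnt, hp]

-- fold of inserts over vocab, from an arbitrary dict of shape pvD
theorem pvFoldInsert (f : String → Int) (vocab M : List String) (h : String → Int)
    (hM : M.Nodup) :
    vocab.foldl (fun d v => d.insert v (f v)) (pvD M h)
      = pvD (PySem.Set.update M vocab) (fun v => if v ∈ vocab then f v else h v) := by
  induction vocab generalizing M h with
  | nil =>
    simp only [List.foldl_nil, PySem.Set.update]
    apply pvD_congr
    intro v _
    simp
  | cons v vs ih =>
    simp only [List.foldl_cons]
    have hupd : PySem.Set.update M (v :: vs) = PySem.Set.update (PySem.Set.add M v) vs := rfl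
    rw [hupd]
    by_cases hv : v ∈ M
    · have hadd : PySem.Set.add M v = M := by simp [PySem.Set.add, PySem.Set.contains, hv]
      rw [pvD_insert M h v (f v) hv, ih M _ hM, hadd]
      apply pvD_congr
      intro w _
      by_cases hws : w ∈ vs
      · simp [hws]
      · by_cases hwv : w = v <;> simp [hws, hwv]
    · have hadd : PySem.Set.add M v = M ++ [v] := by simp [PySem.Set.add, PySem.Set.contains, hv]
      have hins : (pvD M h).insert v (f v) = pvD (M ++ [v]) (fun w => if w = v then f v else h w) := by
        have hnc : (pvD M h).contains v = false := by
          rw [PySem.Dict.contains_eq_decide_mem_keys, pvD_keys]; simp [hv]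
        apply PySem.Dict.ext
        rw [PySem.Dict.items_insert_of_not_contains _ _ hnc]
        simp only [pvD, List.map_append, List.map_cons, List.map_nil]
        congr 1
        · apply List.map_congr_left
          intro w hw
          have : w ≠ v := fun e => hv (e ▸ hw)
          simp [this]
      have hMv : (M ++ [v]).Nodup := by
        simp [List.nodup_append, hM]
        exact fun a ha e => hv (e ▸ ha)
      rw [hins, ih (M ++ [v]) _ hMv, hadd]
      apply pvD_congr
      intro w _
      by_cases hws : w ∈ vs
      · simp [hws]
      · by_cases hwv : w = v <;> simp [hws, hwv]

-- empty dict is pvD [] h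
theorem pvD_nil (h : String → Int) : pvD [] h = PySem.Dict.empty := rfl

-- Port A computes pvD (set(vocab)) (pvCnt tfs)
theorem pvA_eq (tfs : List (List (String × Int))) (vocab : List String) :
    get_doc_freq_from_tfs tfs vocab = (pvD (PySem.Set.ofList vocab) (pvCnt tfs)).items := by
  unfold get_doc_freq_from_tfs
  have hstep : (fun (df : PySem.Dict String Int) v =>
      tfs.foldl (fun df tf =>
          if ((PySem.Dict.mk tf).get? v).isSome then
            df.insert v (df.getD v 0 + 1)
          else df)
        (df.insert v 0))
      = fun (df : PySem.Dict String Int) v => df.insert v (pvCnt tfs v) := by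
    funext df v
    rw [pvInnerA tfs v df 0, zero_add]
  rw [hstep, ← pvD_nil (pvCnt tfs), pvFoldInsert (pvCnt tfs) vocab [] (pvCnt tfs) List.nodup_nil,
    PySem.Set.update_nil_left]
  congr 1
  apply pvD_congr
  intro w hw
  have : w ∈ vocab := (PySem.Set.mem_ofList vocab w).mp hw
  simp [this]

-- B's inner loop over one document's (distinct) keys adds the 0/1 indicator pointwise
theorem pvInnerB (vocab : List String) (ks : List String) (g : String → Int)
    (hks : ks.Nodup) :
    ks.foldl (fun (df : PySem.Dict String Int) k =>
        if PySem.Set.contains (PySem.Set.ofList vocab) k then df.insert k (df.getD k 0 + 1) else df)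
      (pvD (PySem.Set.ofList vocab) g)
      = pvD (PySem.Set.ofList vocab) (fun v => g v + if v ∈ ks then 1 else 0) := by
  induction ks generalizing g with
  | nil =>
    simp only [List.foldl_nil]
    apply pvD_congr
    intro v _
    simp
  | cons k ks' ih =>
    have hknotin : k ∉ ks' := (List.nodup_cons.mp hks).1
    have hks' : ks'.Nodup := (List.nodup_cons.mp hks).2
    simp only [List.foldl_cons]
    by_cases hkv : k ∈ PySem.Set.ofList vocab
    · have hcont : PySem.Set.contains (PySem.Set.ofList vocab) k = true := by
        simp [PySem.Set.contains, hkv]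
      rw [if_pos hcont,
        pvD_getD _ g k (PySem.Set.nodup_ofList vocab) hkv,
        pvD_insert _ g k (g k + 1) hkv, ih _ hks']
      apply pvD_congr
      intro w _
      by_cases hwk : w = k
      · subst hwk
        simp [hknotin]
      · simp [hwk, List.mem_cons]
    · have hcont : PySem.Set.contains (PySem.Set.ofList vocab) k = false := by
        simp only [PySem.Set.contains, List.contains_eq_mem, decide_eq_false_iff_not]
        exact fun h => hkv ((PySem.Set.mem_ofList vocab k).mpr ((PySem.Set.mem_ofList vocab k).mp h))
      rw [if_neg (by simp only [hcont, Bool.false_eq_true, not_false_eq_true]), ih _ hks']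
      apply pvD_congr
      intro w hw
      have hwk : w ≠ k := fun e => hkv (e ▸ hw)
      simp [hwk, List.mem_cons]


-- B's outer loop over the documents accumulates the counts pointwise
theorem pvOuterB (vocab : List String) (tfs : List (List (String × Int))) (g : String → Int)
    (hnd : ∀ tf ∈ tfs, (tf.map Prod.fst).Nodup) :
    tfs.foldl (fun df tf =>
        ((PySem.Dict.mk tf).keys).foldl (fun (df : PySem.Dict String Int) k =>
            if PySem.Set.contains (PySem.Set.ofList vocab) k then df.insert k (df.getD k 0 + 1) else df)
          df)
      (pvD (PySem.Set.ofList vocab) g)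
      = pvD (PySem.Set.ofList vocab) (fun v => g v + pvCnt tfs v) := by
  induction tfs generalizing g with
  | nil =>
    simp only [List.foldl_nil]
    apply pvD_congr
    intro v _
    simp [pvCnt]
  | cons tf ts ih =>
    have hkeys : (PySem.Dict.mk tf).keys = tf.map Prod.fst := by
      simp [PySem.Dict.keys]
    have htf : (tf.map Prod.fst).Nodup := hnd tf (List.mem_cons_self ..)
    have hts : ∀ t ∈ ts, (t.map Prod.fst).Nodup := fun t ht => hnd t (List.mem_cons_of_mem _ ht)
    simp only [List.foldl_cons]
    rw [hkeys, pvInnerB vocab _ g htf, ih _ hts]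
    apply pvD_congr
    intro v _
    have hmem : (((PySem.Dict.mk tf).get? v).isSome = true) ↔ v ∈ tf.map Prod.fst := by
      constructor
      · intro h
        by_contra hnm
        rw [(PySem.Dict.get?_eq_none_iff_not_mem_keys _ _).mpr (by rwa [hkeys])] at h
        simp at h
      · intro h
        cases hg : (PySem.Dict.mk tf).get? v with
        | some w => rfl
        | none =>
          exact absurd (show v ∈ (PySem.Dict.mk tf).keys by rwa [hkeys])
            ((PySem.Dict.get?_eq_none_iff_not_mem_keys _ _).mp hg)
    by_cases hv : v ∈ tf.map Prod.fst
    · have : ((PySem.Dict.mk tf).get? v).isSome = true := hmem.mpr hv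
      simp [pvCnt, this, hv]
      ring
    · have : ¬ ((PySem.Dict.mk tf).get? v).isSome = true := fun h => hv (hmem.mp h)
      simp [pvCnt, this, hv]

-- Port B also computes pvD (set(vocab)) (pvCnt tfs)
theorem pvB_eq (tfs : List (List (String × Int))) (vocab : List String)
    (hnd : ∀ tf ∈ tfs, (tf.map Prod.fst).Nodup) :
    get_doc_freq_from_tfs_alt tfs vocab = (pvD (PySem.Set.ofList vocab) (pvCnt tfs)).items := by
  unfold get_doc_freq_from_tfs_alt
  have hdf0 : vocab.foldl (fun (d : PySem.Dict String Int) v => d.insert v 0) PySem.Dict.empty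
      = pvD (PySem.Set.ofList vocab) (fun _ => 0) := by
    rw [← pvD_nil (fun _ => 0), pvFoldInsert (fun _ => 0) vocab [] (fun _ => 0) List.nodup_nil,
      PySem.Set.update_nil_left]
    apply pvD_congr
    intro v _
    simp
  simp only []
  rw [hdf0, pvOuterB vocab tfs (fun _ => 0) hnd]
  congr 1
  apply pvD_congr
  intro v _
  simp

-- ===== VERDICT (by name: the statement is the Claim_ definition above) =====
theorem get_doc_freq_from_tfs_spec : Claim_equal_get_doc_freq_from_tfs := by
  intro tfs vocab _ hpre
  unfold Spec_get_doc_freq_from_tfs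
  rw [pvA_eq, pvB_eq tfs vocab hpre]
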